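-- pv_equiv track=rewrite | github.com/tektronix/curvequery | test/test_tek_series_curve_digital.py | decode_digital_bitstream
-- ===== SOURCE A (Python) =====
-- def decode_digital_bitstream(waveform):
--     """Extracts a bitstream from the waveform at the specified position"""
--     result = []
--     for i, bit in enumerate(waveform):
--         try:
--             next_bit = waveform[i + 1]
--
--         # No more words, so we are finished
--         except IndexError:
--             break
--
--         # Capture bit value changes
--         if bit != next_bit:
--             result.append(next_bit)
--
--     return result
-- ===== SOURCE B (Python) =====
-- def decode_digital_bitstream(waveform):
--     """Extracts a bitstream from the waveform at the specified position"""
--     # Divide and conquer: transitions of a list are the transitions of each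
--     # half plus, if the halves meet with different values, the first value of
--     # the right half (the boundary transition).
--     def trans(w):
--         if len(w) < 2:
--             return []
--         mid = len(w) // 2
--         left, right = w[:mid], w[mid:]
--         bridge = [right[0]] if left[-1] != right[0] else []
--         return trans(left) + bridge + trans(right)
--     return trans(waveform)
-- ===== Notes on version B (the rewrite author's own statement) =====
-- stated objective: alternative
-- what changed: Replaces A's indexed adjacent-pair scan (with an IndexError-terminated lookahead) by a divide-and-conquer recursion: split the list in half, recurse on each half, and join with the boundary transition if the halves meet with different values.
import Mathlib
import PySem

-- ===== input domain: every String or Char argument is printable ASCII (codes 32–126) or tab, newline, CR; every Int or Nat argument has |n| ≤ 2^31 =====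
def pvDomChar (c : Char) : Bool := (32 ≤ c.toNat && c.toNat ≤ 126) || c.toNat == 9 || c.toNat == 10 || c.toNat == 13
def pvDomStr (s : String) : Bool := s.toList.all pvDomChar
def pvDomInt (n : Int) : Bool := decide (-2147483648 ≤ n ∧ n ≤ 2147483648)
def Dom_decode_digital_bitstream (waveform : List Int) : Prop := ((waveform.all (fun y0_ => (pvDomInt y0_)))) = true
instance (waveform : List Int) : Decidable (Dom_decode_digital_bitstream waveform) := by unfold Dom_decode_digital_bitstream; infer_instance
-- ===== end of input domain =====

-- B computes the transitions by divide-and-conquer (split in half, recurse, join at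
-- the boundary) instead of A's indexed adjacent-pair scan; alternative decomposition.


-- ===== PORT A =====
-- loop body of A: enumerate(waveform); look up waveform[i+1] (IndexError => break);
-- append next_bit to result when bit != next_bit
def decodeGoA (wf : List Int) : Nat → List Int → List Int → List Int
  | _, [], res => res
  | i, bit :: rest, res =>
    match PySem.List.pyGet? wf ((i : Int) + 1) with
    | none => res
    | some next_bit =>
        decodeGoA wf (i + 1) rest (if bit ≠ next_bit then res ++ [next_bit] else res)

def decode_digital_bitstream (waveform : List Int) : List Int :=
  decodeGoA waveform 0 waveform []

-- ===== PORT B =====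
-- trans: B's divide-and-conquer helper.  left[-1] / right[0] are ported as
-- getLast? / head? (both halves are nonempty when len(w) >= 2, so the
-- 'unreachable' arm mirrors Python never taking it).
def transB (w : List Int) : List Int :=
  if w.length < 2 then []
  else
    let mid := w.length / 2
    let left := w.take mid
    let right := w.drop mid
    transB left ++
      (match left.getLast?, right.head? with
       | some a, some b => if a ≠ b then [b] else []
       | _, _ => []) ++
      transB right
termination_by w.length
decreasing_by
  · simp only [List.length_take]
    omega
  · simp only [List.length_drop]
    omega

def decode_digital_bitstream_alt (waveform : List Int) : List Int :=
  transB waveform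

-- ===== PRECONDITION & SPEC =====
def Spec_decode_digital_bitstream (waveform : List Int) (out : List Int) : Prop := out = decode_digital_bitstream_alt waveform
instance (waveform : List Int) (out : List Int) : Decidable (Spec_decode_digital_bitstream waveform out) := by unfold Spec_decode_digital_bitstream; infer_instance

-- ===== CLAIM (what is proved, stated in full; the proofs are below) =====
def Claim_equal_decode_digital_bitstream : Prop := ∀ (waveform : List Int), Dom_decode_digital_bitstream waveform → Spec_decode_digital_bitstream waveform (decode_digital_bitstream waveform)

-- ===== LEMMAS AND PROOFS =====

-- pairwise abstraction of A's loop (result is appended in order)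
def pairsA : List Int → List Int
  | a :: b :: r => (if a ≠ b then [b] else []) ++ pairsA (b :: r)
  | _ => []

theorem decodeGoA_cons (wf : List Int) (i : Nat) (bit : Int) (rest res : List Int) :
    decodeGoA wf i (bit :: rest) res =
      match PySem.List.pyGet? wf ((i : Int) + 1) with
      | none => res
      | some next_bit =>
          decodeGoA wf (i + 1) rest (if bit ≠ next_bit then res ++ [next_bit] else res) := rfl

theorem decodeGoA_spec (rest : List Int) : ∀ (pre res : List Int),
    decodeGoA (pre ++ rest) pre.length rest res = res ++ pairsA rest := by
  induction rest with
  | nil => intro pre res; simp [decodeGoA, pairsA]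
  | cons bit rest ih =>
    intro pre res
    cases rest with
    | nil =>
      have h : PySem.List.pyGet? (pre ++ [bit]) ((pre.length : Int) + 1) = none := by
        rw [PySem.List.pyGet?_eq_none_iff]
        simp only [PySem.Raise.InRange]
        intro hr
        simp at hr
      simp [decodeGoA, h, pairsA]
    | cons b r =>
      have h : PySem.List.pyGet? (pre ++ bit :: b :: r) ((pre.length : Int) + 1) = some b := by
        have : ((pre.length : Int) + 1) = ((pre ++ [bit]).length : Int) := by simp
        rw [this]
        have := PySem.List.pyGet?_append_length (pre := pre ++ [bit]) (y := b) (ys := r)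
        simpa using this
      have hpre : pre ++ bit :: b :: r = (pre ++ [bit]) ++ b :: r := by simp
      have hlen : pre.length + 1 = (pre ++ [bit]).length := by simp
      rw [decodeGoA_cons, h]
      simp only []
      rw [hpre, hlen, ih (pre ++ [bit])]
      by_cases hb : bit = b <;> simp [pairsA, hb]

-- splitting lemma: transitions of a concatenation = transitions of the parts
-- plus the boundary transition
theorem pairsA_append (l : List Int) : ∀ r : List Int, l ≠ [] → r ≠ [] →
    pairsA (l ++ r) =
      pairsA l ++
        (match l.getLast?, r.head? with
         | some a, some b => if a ≠ b then [b] else []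
         | _, _ => []) ++
      pairsA r := by
  induction l with
  | nil => intro r h; exact absurd rfl h
  | cons a l ih =>
    intro r _ hr
    cases l with
    | nil =>
      cases r with
      | nil => exact absurd rfl hr
      | cons b rr =>
        by_cases hab : a = b <;> simp [pairsA, hab]
    | cons c l' =>
      have hA : pairsA (a :: c :: (l' ++ r)) =
          (if a ≠ c then [c] else []) ++ pairsA (c :: (l' ++ r)) := by
        simp [pairsA]
      have hA' : pairsA (a :: c :: l') =
          (if a ≠ c then [c] else []) ++ pairsA (c :: l') := by
        simp [pairsA]
      have hcons : (a :: c :: l') ++ r = a :: c :: (l' ++ r) := by simp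
      have hih := ih r (by simp) hr
      rw [List.cons_append] at hih
      rw [hcons, hA, hih, hA']
      simp [List.getLast?_cons_cons]
theorem transB_eq_pairsA (w : List Int) : transB w = pairsA w := by
  induction w using transB.induct with
  | case1 w hlt =>
    rw [transB, if_pos hlt]
    match w, hlt with
    | [], _ => rfl
    | [a], _ => rfl
  | case2 w hlt mid left right ih1 ih2 =>
    rw [transB, if_neg hlt]
    simp only []
    rw [ih1, ih2]
    have hl : left ≠ [] := by
      have : left.length = mid := by simp [left, List.length_take]; omega
      intro h; rw [h] at this; simp [mid] at this; omega
    have hr : right ≠ [] := by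
      have : right.length = w.length - mid := by simp [right]
      intro h; rw [h] at this; simp at this; omega
    have := pairsA_append left right hl hr
    rw [show left ++ right = w from List.take_append_drop mid w] at this
    rw [this]

-- ===== VERDICT (by name: the statement is the Claim_ definition above) =====
theorem decode_digital_bitstream_spec : Claim_equal_decode_digital_bitstream := by
  intro waveform _
  unfold Spec_decode_digital_bitstream decode_digital_bitstream decode_digital_bitstream_alt
  have hA := decodeGoA_spec waveform [] []
  simp only [List.nil_append, List.length_nil] at hA
  rw [hA, transB_eq_pairsA]
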